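-- pv_equiv track=rewrite | github.com/nstvslna/k_task | Lecture5_6/task4.py | shorten_string
-- ===== SOURCE A (Python) =====
-- def shorten_string(s):
--     if len(s) <= 1:
--         return s
--     else:
--         # Якщо перший і останній символи рівні, видаляємо їх та рекурсивно викликаємо функцію для решти рядка
--         if s[0] == s[-1]:
--             return shorten_string(s[1:-1])
--         else:
--             # Якщо перший і останній символи не рівні, повертаємо перший символ та рекурсивно викликаємо функцію для решти рядка
--             return s[0] + shorten_string(s[1:-1]) + s[-1]
-- ===== SOURCE B (Python) =====
-- def shorten_string(s):
--     n = len(s)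
--     kept = [(a, b) for a, b in list(zip(s, s[::-1]))[:n // 2] if a != b]
--     left = ''.join(a for a, _ in kept)
--     right = ''.join(b for _, b in kept)[::-1]
--     mid = s[n // 2] if n % 2 == 1 else ''
--     return left + mid + right
-- ===== Notes on version B (the rewrite author's own statement) =====
-- stated objective: faster
-- what changed: Replaces A's recursion that re-slices s[1:-1] at every level (quadratic copying) with a single pass over the symmetric pairs zip(s, s[::-1]) limited to the first half, collecting kept left/right characters plus the middle char, joined once.
import Mathlib
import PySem

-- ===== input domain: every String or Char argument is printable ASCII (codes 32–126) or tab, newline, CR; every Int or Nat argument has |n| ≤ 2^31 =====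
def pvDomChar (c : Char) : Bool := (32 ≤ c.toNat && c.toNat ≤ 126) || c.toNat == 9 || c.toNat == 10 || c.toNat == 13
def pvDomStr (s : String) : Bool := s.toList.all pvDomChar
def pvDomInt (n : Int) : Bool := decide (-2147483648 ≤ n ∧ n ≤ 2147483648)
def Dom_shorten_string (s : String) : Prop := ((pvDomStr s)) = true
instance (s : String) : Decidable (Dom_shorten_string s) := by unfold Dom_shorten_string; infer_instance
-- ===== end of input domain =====

-- B replaces A's O(n^2) recursion (repeated slicing) with one zip-based pass over the
-- symmetric pairs; equivalence of the RETURN values is proved (objective: faster).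

-- ===== PORT A =====
-- literal transliteration of A's recursion on the character list
def shortenA (l : List Char) : List Char :=
  if l.length ≤ 1 then l
  else
    if PySem.List.pyGetD l 0 ' ' = PySem.List.pyGetD l (-1) ' ' then
      shortenA (PySem.List.slice l (some 1) (some (-1)))
    else
      PySem.List.pyGetD l 0 ' ' ::
        shortenA (PySem.List.slice l (some 1) (some (-1))) ++
          [PySem.List.pyGetD l (-1) ' ']
termination_by l.length
decreasing_by
  all_goals
    simp only [PySem.List.length_slice, PySem.List.clampIdx]
    split_ifs <;> simp_all
    all_goals omega

def shorten_string (s : String) : String := String.ofList (shortenA s.toList)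

-- ===== PORT B =====
-- kept = [(a, b) for a, b in list(zip(s, s[::-1]))[:n // 2] if a != b]
def keptPairs (l : List Char) : List (Char × Char) :=
  ((l.zip l.reverse).take (l.length / 2)).filter (fun p => p.1 ≠ p.2)

-- left + mid + right  (mid = s[n//2] if n is odd; right is the kept snd-chars reversed)
def shortenB (l : List Char) : List Char :=
  (keptPairs l).map Prod.fst
    ++ (if l.length % 2 = 1 then (l[l.length / 2]?).toList else [])
    ++ ((keptPairs l).map Prod.snd).reverse

def shorten_string_alt (s : String) : String := String.ofList (shortenB s.toList)

-- ===== PRECONDITION & SPEC =====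
def Spec_shorten_string (s : String) (out : String) : Prop := out = shorten_string_alt s
instance (s : String) (out : String) : Decidable (Spec_shorten_string s out) := by unfold Spec_shorten_string; infer_instance

-- ===== CLAIM (what is proved, stated in full; the proofs are below) =====
def Claim_equal_shorten_string : Prop := ∀ (s : String), Dom_shorten_string s → Spec_shorten_string s (shorten_string s)

-- ===== LEMMAS AND PROOFS =====

lemma shortenA_nil : shortenA [] = [] := by
  unfold shortenA; simp

lemma shortenA_single (c : Char) : shortenA [c] = [c] := by
  unfold shortenA; simp

lemma slice_cons_concat (a b : Char) (m : List Char) :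
    PySem.List.slice (a :: m ++ [b]) (some 1) (some (-1)) = m := by
  simp only [PySem.List.slice, PySem.List.clampIdx]
  norm_num
  rw [if_neg (by omega)]
  simp

lemma shortenA_step (a b : Char) (m : List Char) :
    shortenA (a :: m ++ [b]) =
      if a = b then shortenA m else a :: shortenA m ++ [b] := by
  rw [shortenA]
  have h1 : ¬ (a :: m ++ [b]).length ≤ 1 := by simp
  have h2 : PySem.List.pyGetD (a :: m ++ [b]) 0 ' ' = a := by
    simp [PySem.List.pyGetD_zero_cons]
  have h3 : PySem.List.pyGetD (a :: m ++ [b]) (-1) ' ' = b := by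
    have : a :: m ++ [b] = (a :: m) ++ [b] := by simp
    rw [this, PySem.List.pyGetD_neg_one_append_singleton]
  rw [if_neg h1, h2, h3, slice_cons_concat]

lemma keptPairs_step (a b : Char) (m : List Char) :
    keptPairs (a :: m ++ [b]) =
      (if a = b then [] else [(a, b)]) ++ keptPairs m := by
  unfold keptPairs
  have hrev : (a :: m ++ [b]).reverse = b :: (m.reverse ++ [a]) := by simp
  have hlen : (a :: m ++ [b]).length = m.length + 2 := by simp
  rw [hrev, hlen]
  have hdiv : (m.length + 2) / 2 = m.length / 2 + 1 := by omega
  rw [hdiv]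
  have hzip : (m ++ [b]).zip (m.reverse ++ [a]) = m.zip m.reverse ++ [(b, a)] := by
    rw [List.zip_append (by simp)]
    simp
  show (((a, b) :: (m ++ [b]).zip (m.reverse ++ [a])).take (m.length / 2 + 1)).filter _ = _
  rw [hzip, List.take_succ_cons,
      List.take_append_of_le_length (by simp [List.length_zip]; omega)]
  by_cases hab : a = b <;> simp [hab, List.filter]

lemma shortenB_step (a b : Char) (m : List Char) :
    shortenB (a :: m ++ [b]) =
      if a = b then shortenB m else a :: shortenB m ++ [b] := by
  unfold shortenB
  rw [keptPairs_step]
  have hlen : (a :: m ++ [b]).length = m.length + 2 := by simp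
  have hmod : (a :: m ++ [b]).length % 2 = m.length % 2 := by omega
  have hdiv : (a :: m ++ [b]).length / 2 = m.length / 2 + 1 := by omega
  have hmid : (if (a :: m ++ [b]).length % 2 = 1
        then ((a :: m ++ [b])[(a :: m ++ [b]).length / 2]?).toList else []) =
      (if m.length % 2 = 1 then (m[m.length / 2]?).toList else []) := by
    rw [hmod, hdiv]
    by_cases h : m.length % 2 = 1
    · rw [if_pos h, if_pos h]
      have hlt : m.length / 2 < m.length := by omega
      have : (a :: m ++ [b])[m.length / 2 + 1]? = (m ++ [b])[m.length / 2]? := by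
        simp
      rw [this, List.getElem?_append_left hlt]
    · rw [if_neg h, if_neg h]
  rw [hmid]
  by_cases hab : a = b
  · simp [hab]
  · simp [hab]

lemma shortenB_nil : shortenB [] = [] := by
  simp [shortenB, keptPairs]

lemma shortenB_single (c : Char) : shortenB [c] = [c] := by
  simp [shortenB, keptPairs]

lemma shortenAB (n : ℕ) : ∀ l : List Char, l.length ≤ n → shortenA l = shortenB l := by
  induction n with
  | zero =>
    intro l hl
    have : l = [] := by cases l <;> simp_all
    subst this; rw [shortenA_nil, shortenB_nil]
  | succ n ih =>
    intro l hl
    match l with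
    | [] => rw [shortenA_nil, shortenB_nil]
    | [c] => rw [shortenA_single, shortenB_single]
    | a :: c :: t =>
      rcases List.eq_nil_or_concat (c :: t) with h | ⟨m, b, hm⟩
      · simp at h
      · have : a :: c :: t = a :: m ++ [b] := by simp [hm]
        rw [this] at hl ⊢
        have hmlen : m.length ≤ n := by simp at hl ⊢; omega
        rw [shortenA_step, shortenB_step, ih m hmlen]

-- ===== VERDICT (by name: the statement is the Claim_ definition above) =====
theorem shorten_string_spec : Claim_equal_shorten_string := by
  intro s _
  unfold Spec_shorten_string shorten_string shorten_string_alt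
  rw [shortenAB s.toList.length s.toList le_rfl]
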